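-- pv_equiv track=rewrite | github.com/jnywong/frx-challenges | harness/longest.py | evaluate
-- ===== SOURCE A (Python) =====
-- import string
--
-- def evaluate(text: str) -> dict:
--     char_counts = {}
--     casefolded_chars = [c.casefold() for c in string.ascii_lowercase]
--
--     for c in text:
--         cf = c.casefold()
--         if cf in casefolded_chars:
--             char_counts[cf] = char_counts.get(cf, 0) + 1
--
--     return {
--         "lines": len(text.splitlines()),
--         "chars": len(text)
--     } | char_counts
-- ===== SOURCE B (Python) =====
-- import string
--
-- def evaluate(text: str) -> dict:
--     folded = "".join(c.casefold() for c in text)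
--     seen = dict.fromkeys(ch for ch in folded if ch in string.ascii_lowercase)
--     result = {"lines": len(text.splitlines()), "chars": len(text)}
--     for ch in seen:
--         result[ch] = folded.count(ch)
--     return result
-- ===== Notes on version B (the rewrite author's own statement) =====
-- stated objective: alternative
-- what changed: Instead of accumulating per-character counts in a dict during one pass, B first dedups the casefolded letters in first-occurrence order (dict.fromkeys) and then fills the result with one str.count per distinct letter.
import Mathlib
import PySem

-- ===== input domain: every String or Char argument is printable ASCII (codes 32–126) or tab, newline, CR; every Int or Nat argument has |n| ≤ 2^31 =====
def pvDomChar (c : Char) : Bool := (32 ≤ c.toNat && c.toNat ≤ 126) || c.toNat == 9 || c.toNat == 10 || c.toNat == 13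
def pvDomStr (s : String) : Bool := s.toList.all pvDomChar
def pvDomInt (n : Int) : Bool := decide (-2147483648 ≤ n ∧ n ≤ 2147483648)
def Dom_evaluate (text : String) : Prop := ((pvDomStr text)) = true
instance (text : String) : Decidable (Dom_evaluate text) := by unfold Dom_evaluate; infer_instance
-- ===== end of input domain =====

-- B replaces A's single-pass dict accumulation by dedup-then-count-per-letter (same cost class); equal return values proved for all strings.


-- ===== PORT A =====
-- c.casefold() for a single char: exact on the ASCII domain (one-char result = lower)
def pvCf (c : Char) : Char := PySem.Chars.lowerChar c
-- string.ascii_lowercase (as chars; the 1-char strings involved are modelled by their Char)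
def pvAz : List Char := "abcdefghijklmnopqrstuvwxyz".toList

def evaluate (text : String) : List (String × Int) :=
  let casefolded_chars : List Char := pvAz.map pvCf
  let char_counts : PySem.Dict String Int :=
    text.toList.foldl (fun d c =>
      let cf := pvCf c
      if casefolded_chars.contains cf then
        d.insert (String.ofList [cf]) (d.getD (String.ofList [cf]) 0 + 1)
      else d) PySem.Dict.empty
  -- {"lines": …, "chars": …} | char_counts
  ((PySem.Dict.ofList [("lines", ((PySem.Str.splitlines text).length : Int)),
                       ("chars", PySem.Str.len text)]).update char_counts.items).items

-- ===== PORT B =====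
def evaluate_alt (text : String) : List (String × Int) :=
  -- "".join(c.casefold() for c in text): exact on ASCII, charwise
  let folded : List Char := text.toList.map pvCf
  -- dict.fromkeys(ch for ch in folded if ch in string.ascii_lowercase)
  let seen : List Char := PySem.List.dedup (folded.filter (fun ch => pvAz.contains ch))
  let result : PySem.Dict String Int :=
    PySem.Dict.ofList [("lines", ((PySem.Str.splitlines text).length : Int)),
                       ("chars", PySem.Str.len text)]
  -- folded.count(ch): str.count with a 1-char needle = char count
  (seen.foldl (fun d ch => d.insert (String.ofList [ch]) ((folded.count ch : Int))) result).items

-- ===== PRECONDITION & SPEC =====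
def Spec_evaluate (text : String) (out : List (String × Int)) : Prop := out = evaluate_alt text
instance (text : String) (out : List (String × Int)) : Decidable (Spec_evaluate text out) := by unfold Spec_evaluate; infer_instance

-- ===== CLAIM (what is proved, stated in full; the proofs are below) =====
def Claim_equal_evaluate : Prop := ∀ (text : String), Dom_evaluate text → Spec_evaluate text (evaluate text)

-- ===== LEMMAS AND PROOFS =====

theorem pvMkS_injective : Function.Injective (fun ch : Char => String.ofList [ch]) := by
  intro a b h
  have h2 := congrArg String.toList h
  simpa using h2

theorem pvMkS_ne_lines (ch : Char) : String.ofList [ch] ≠ "lines" := by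
  intro h; have := congrArg String.toList h; simp at this

theorem pvMkS_ne_chars (ch : Char) : String.ofList [ch] ≠ "chars" := by
  intro h; have := congrArg String.toList h; simp at this

theorem pvOfList_map {α β : Type} [DecidableEq α] [DecidableEq β]
    (f : α → β) (hf : Function.Injective f) (xs : List α) :
    PySem.Set.ofList (xs.map f) = (PySem.Set.ofList xs).map f := by
  induction xs using List.reverseRecOn with
  | nil => rfl
  | append_singleton xs x ih =>
      rw [List.map_append, List.map_singleton, PySem.Set.ofList_append_singleton,
        PySem.Set.ofList_append_singleton, ih, PySem.Set.add_eq_ite, PySem.Set.add_eq_ite]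
      by_cases hx : x ∈ PySem.Set.ofList xs
      · rw [if_pos ((List.mem_map_of_injective hf).2 hx), if_pos hx]
      · rw [if_neg (fun h => hx ((List.mem_map_of_injective hf).1 h)), if_neg hx, List.map_append,
          List.map_singleton]

theorem pvBase_fresh (L C : Int) (ch : Char) :
    (PySem.Dict.ofList [(("lines" : String), L), ("chars", C)]).contains (String.ofList [ch]) = false := by
  rw [PySem.Dict.contains_eq_decide_mem_keys]
  have hk : (PySem.Dict.ofList [(("lines" : String), L), ("chars", C)]).keys = ["lines", "chars"] := rfl
  rw [hk]
  simp [pvMkS_ne_lines ch, pvMkS_ne_chars ch]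

theorem pvUpdate_items {κ ν : Type} [BEq κ] [LawfulBEq κ] (d : PySem.Dict κ ν) (ps : List (κ × ν))
    (fresh : ∀ p ∈ ps, d.contains p.1 = false) (nd : (ps.map (fun p => p.1)).Nodup) :
    (PySem.Dict.update d ps).items = d.items ++ ps := by
  have h := PySem.Dict.items_foldl_insert_fresh ps (fun p => p.1) (fun p => p.2) d fresh nd
  simpa using h

theorem evaluate_eq (text : String) : evaluate text = evaluate_alt text := by
  simp only [evaluate, evaluate_alt]
  have haz : pvAz.map pvCf = pvAz := by decide
  rw [haz]
  set L : Int := ((PySem.Str.splitlines text).length : Int)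
  set C : Int := PySem.Str.len text
  set base := PySem.Dict.ofList [(("lines" : String), L), ("chars", C)] with hbase
  set folded : List Char := text.toList.map pvCf with hfolded
  set xs : List Char := folded.filter (fun ch => pvAz.contains ch) with hxs
  -- A's counting loop is Counter(ys) for ys = xs.map (fun ch => String.ofList [ch])
  have hA : text.toList.foldl (fun d c =>
        if pvAz.contains (pvCf c) = true then
          d.insert (String.ofList [pvCf c]) (d.getD (String.ofList [pvCf c]) 0 + 1)
        else d) PySem.Dict.empty
      = PySem.Dict.counter (xs.map (fun ch => String.ofList [ch])) := by
    rw [← PySem.Dict.foldl_insert_getD_add_one_eq_counter, List.foldl_map, hxs,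
      List.foldl_filter, hfolded, List.foldl_map]
  rw [hA]
  -- A's dict-union loop appends the fresh letter keys
  have hfreshA : ∀ p ∈ (PySem.Dict.counter (xs.map (fun ch => String.ofList [ch]))).items,
      base.contains p.1 = false := by
    intro p hp
    have hk := PySem.Dict.mem_keys_of_mem_items _ hp
    rw [PySem.Dict.keys_counter] at hk
    have hk2 := (PySem.Set.mem_ofList _ _).1 hk
    rcases List.mem_map.1 hk2 with ⟨ch, _, hch⟩
    rw [← hch]
    exact pvBase_fresh L C ch
  have hndA : ((PySem.Dict.counter (xs.map (fun ch => String.ofList [ch]))).items.map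
      (fun p => p.1)).Nodup :=
    PySem.Dict.nodup_keys_counter _
  rw [pvUpdate_items base _ hfreshA hndA]
  -- B's filling loop appends the fresh letter keys too
  have hndB : ((PySem.List.dedup xs).map (fun ch => String.ofList [ch])).Nodup := by
    rw [PySem.List.dedup_eq_ofList]
    exact (PySem.Set.nodup_ofList xs).map pvMkS_injective
  have hB := PySem.Dict.items_foldl_insert_fresh (PySem.List.dedup xs)
    (fun ch => String.ofList [ch]) (fun ch => ((folded.count ch : Int))) base
    (fun ch _ => pvBase_fresh L C ch) hndB
  rw [hB]
  -- both are base.items ++ the same letter/count list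
  congr 1
  rw [PySem.Dict.items_counter, pvOfList_map (fun ch => String.ofList [ch]) pvMkS_injective xs,
    List.map_map, PySem.List.dedup_eq_ofList]
  refine List.map_congr_left ?_
  intro ch hch
  have hmem : ch ∈ xs := (PySem.Set.mem_ofList _ _).1 hch
  have hL : pvAz.contains ch = true := (List.mem_filter.1 hmem).2
  simp only [Function.comp]
  rw [List.count_map_of_injective _ _ pvMkS_injective, hxs, List.count_filter hL]

-- ===== VERDICT (by name: the statement is the Claim_ definition above) =====
theorem evaluate_spec : Claim_equal_evaluate := by
  intro text _
  unfold Spec_evaluate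
  exact evaluate_eq text
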